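-- pv_equiv track=rewrite | github.com/CheungBH/yolov7 | strategy/utils.py | find_and_merge_non_three_intervals
-- ===== SOURCE A (Python) =====
-- def find_and_merge_non_three_intervals(data,start=0):
--     intervals = []
--     n = len(data)
--     i = 0
--
--     # 找到所有连续的、不等于 3 的子区间
--     while i < n:
--         # 跳过等于 3 的部分
--         if data[i] == 3:
--             i += 1
--             continue
--
--         # 找到不等于 3 的起点
--         start_idx = i
--
--         # 继续寻找不等于 3 的终点
--         while i < n and data[i] != 3:
--             i += 1
--
--         # 确定终点索引
--         end_idx = i - 1
--
--         # 检查子区间的长度是否大于 1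
--         if end_idx - start_idx + 1 > 1:
--             intervals.append([start_idx, end_idx])
--
--     # 如果没有找到符合条件的区间，返回空列表
--     if not intervals:
--         return []
--
--     # 合并所有区间为一个大区间
--     starts = [interval[0] for interval in intervals]
--     ends = [interval[1] for interval in intervals]
--     merged_start = min(starts) +start
--     merged_end = max(ends) +start
--
--     return [merged_start, merged_end]
-- ===== SOURCE B (Python) =====
-- def find_and_merge_non_three_intervals(data, start=0):
--     n = len(data)
--     # forward pass: first index that begins a maximal non-3 run of length > 1
--     s = None
--     for i in range(n):
--         if data[i] != 3 and i + 1 < n and data[i + 1] != 3 and (i == 0 or data[i - 1] == 3):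
--             s = i
--             break
--     if s is None:
--         return []
--     # backward pass: last index that ends a maximal non-3 run of length > 1
--     e = None
--     for j in range(n - 1, -1, -1):
--         if data[j] != 3 and j - 1 >= 0 and data[j - 1] != 3 and (j == n - 1 or data[j + 1] == 3):
--             e = j
--             break
--     return [s + start, e + start]
-- ===== Notes on version B (the rewrite author's own statement) =====
-- stated objective: simpler
-- what changed: A collects every qualifying interval with nested while-loops and then takes min over all starts and max over all ends; B never builds an interval list: a forward scan returns the first index whose pointwise boundary test says 'starts a maximal non-3 run of length > 1', and an independent backward scan returns the last index that ends such a run, each breaking at the first hit.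
import Mathlib
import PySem

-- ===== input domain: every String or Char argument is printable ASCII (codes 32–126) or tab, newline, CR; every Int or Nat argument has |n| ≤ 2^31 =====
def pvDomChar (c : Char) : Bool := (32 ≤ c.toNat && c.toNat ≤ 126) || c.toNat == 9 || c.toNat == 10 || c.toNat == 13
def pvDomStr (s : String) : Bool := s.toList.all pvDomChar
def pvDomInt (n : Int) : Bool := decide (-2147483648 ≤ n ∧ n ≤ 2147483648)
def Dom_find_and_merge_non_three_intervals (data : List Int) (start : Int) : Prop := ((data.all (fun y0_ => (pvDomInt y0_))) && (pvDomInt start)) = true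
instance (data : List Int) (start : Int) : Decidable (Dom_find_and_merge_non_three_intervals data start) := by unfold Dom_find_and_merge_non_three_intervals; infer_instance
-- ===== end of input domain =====

-- B replaces A's interval-collecting scan (nested while loops + min/max over all collected
-- intervals) by two independent boundary-test passes: a forward pass finding the first index
-- that STARTS a maximal non-3 run of length > 1, and a backward pass finding the last index
-- that ENDS such a run; objective: simpler (no interval list, no min/max).

-- ===== PORT A =====
-- data[i] for an in-range index (every access below is guarded by a range check)
def pvAt (d : List Int) (k : Nat) : Int := (d[k]?).getD 0

-- inner while: `while i < n and data[i] != 3: i += 1`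
def pvInnerA (d : List Int) (i : Nat) : Nat :=
  if _h : i < d.length then
    if pvAt d i ≠ 3 then pvInnerA d (i + 1) else i
  else i
termination_by d.length - i

theorem pvInnerA_ge (d : List Int) (i : Nat) : i ≤ pvInnerA d i := by
  unfold pvInnerA
  split
  · split
    · have := pvInnerA_ge d (i + 1); omega
    · omega
  · omega
termination_by d.length - i

theorem pvInnerA_lt (d : List Int) (i : Nat) (h : i < d.length) (h3 : pvAt d i ≠ 3) :
    i < pvInnerA d i := by
  unfold pvInnerA
  simp only [h, h3, dite_true, if_true, ne_eq, not_false_eq_true]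
  have := pvInnerA_ge d (i + 1); omega

-- outer while over indices, collecting qualifying intervals in `acc`
def pvOuterA (d : List Int) (i : Nat) (acc : List (Nat × Nat)) : List (Nat × Nat) :=
  if h : i < d.length then
    if h3 : pvAt d i = 3 then pvOuterA d (i + 1) acc
    else
      let j := pvInnerA d i
      if (j - 1) - i + 1 > 1 then pvOuterA d j (acc ++ [(i, j - 1)]) else pvOuterA d j acc
  else acc
termination_by d.length - i
decreasing_by all_goals first
  | omega
  | (have := pvInnerA_lt d i h h3; omega)

def find_and_merge_non_three_intervals (data : List Int) (start : Int) : List Int :=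
  let intervals := pvOuterA data 0 []
  if intervals = [] then []
  else
    let starts := intervals.map (fun p => (p.1 : Int))
    let ends := intervals.map (fun p => (p.2 : Int))
    let merged_start := (PySem.List.min? starts (fun x => x)).getD 0 + start
    let merged_end := (PySem.List.max? ends (fun x => x)).getD 0 + start
    [merged_start, merged_end]

-- ===== PORT B =====
-- test: index i begins a maximal non-3 run of length > 1
def pvPb (d : List Int) (i : Nat) : Bool :=
  pvAt d i ≠ 3 && i + 1 < d.length && pvAt d (i + 1) ≠ 3 && (i = 0 || pvAt d (i - 1) = 3)

-- test: index j ends a maximal non-3 run of length > 1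
def pvQb (d : List Int) (j : Nat) : Bool :=
  pvAt d j ≠ 3 && 1 ≤ j && pvAt d (j - 1) ≠ 3 && (j = d.length - 1 || pvAt d (j + 1) = 3)

-- forward pass: `for i in range(n): if P(i): s = i; break`
def pvFwdB (d : List Int) (i : Nat) : Option Nat :=
  if _h : i < d.length then
    if pvPb d i then some i else pvFwdB d (i + 1)
  else none
termination_by d.length - i

-- backward pass: `for j in range(n-1, -1, -1): if Q(j): e = j; break`
def pvBwdB (d : List Int) : Nat → Option Nat
  | 0 => if pvQb d 0 then some 0 else none
  | j + 1 => if pvQb d (j + 1) then some (j + 1) else pvBwdB d j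

def find_and_merge_non_three_intervals_alt (data : List Int) (start : Int) : List Int :=
  match pvFwdB data 0 with
  | none => []
  | some s =>
    match pvBwdB data (data.length - 1) with
    | none => []  -- unreachable: a qualifying run has an end whenever it has a start
    | some e => [(s : Int) + start, (e : Int) + start]

-- ===== PRECONDITION & SPEC =====
def Spec_find_and_merge_non_three_intervals (data : List Int) (start : Int) (out : List Int) : Prop := out = find_and_merge_non_three_intervals_alt data start
instance (data : List Int) (start : Int) (out : List Int) : Decidable (Spec_find_and_merge_non_three_intervals data start out) := by unfold Spec_find_and_merge_non_three_intervals; infer_instance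

-- ===== CLAIM (what is proved, stated in full; the proofs are below) =====
def Claim_equal_find_and_merge_non_three_intervals : Prop := ∀ (data : List Int) (start : Int), Dom_find_and_merge_non_three_intervals data start → Spec_find_and_merge_non_three_intervals data start (find_and_merge_non_three_intervals data start)

-- ===== LEMMAS AND PROOFS =====

theorem pvInnerA_le (d : List Int) (i : Nat) (h : i ≤ d.length) : pvInnerA d i ≤ d.length := by
  unfold pvInnerA
  split
  · split
    · exact pvInnerA_le d (i + 1) (by omega)
    · omega
  · omega
termination_by d.length - i

theorem pvInnerA_stop (d : List Int) (i : Nat) :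
    d.length ≤ pvInnerA d i ∨ pvAt d (pvInnerA d i) = 3 := by
  unfold pvInnerA
  split
  · split
    · exact pvInnerA_stop d (i + 1)
    · rename_i h3; right; simpa using h3
  · left; omega
termination_by d.length - i

theorem pvInnerA_run (d : List Int) (i : Nat) :
    ∀ k, i ≤ k → k < pvInnerA d i → k < d.length ∧ pvAt d k ≠ 3 := by
  intro k hik hk
  rw [pvInnerA] at hk
  split at hk
  · split at hk
    · rcases Nat.eq_or_lt_of_le hik with rfl | hlt
      · rename_i h hne; exact ⟨h, hne⟩
      · exact pvInnerA_run d (i + 1) k hlt hk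
    · omega
  · omega
termination_by d.length - i

-- rewriting equations for pvOuterA
theorem pvOuterA_stop (d : List Int) (i : Nat) (acc : List (Nat × Nat)) (h : ¬ i < d.length) :
    pvOuterA d i acc = acc := by
  rw [pvOuterA, dif_neg h]

theorem pvOuterA_skip (d : List Int) (i : Nat) (acc : List (Nat × Nat)) (h : i < d.length)
    (h3 : pvAt d i = 3) : pvOuterA d i acc = pvOuterA d (i + 1) acc := by
  rw [pvOuterA, dif_pos h, dif_pos h3]

theorem pvOuterA_run (d : List Int) (i : Nat) (acc : List (Nat × Nat)) (h : i < d.length)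
    (h3 : ¬ pvAt d i = 3) :
    pvOuterA d i acc =
      if (pvInnerA d i - 1) - i + 1 > 1 then pvOuterA d (pvInnerA d i) (acc ++ [(i, pvInnerA d i - 1)])
      else pvOuterA d (pvInnerA d i) acc := by
  rw [pvOuterA, dif_pos h, dif_neg h3]

theorem pvOuterA_acc (d : List Int) (i : Nat) (acc : List (Nat × Nat)) :
    pvOuterA d i acc = acc ++ pvOuterA d i [] := by
  by_cases h : i < d.length
  · by_cases h3 : pvAt d i = 3
    · rw [pvOuterA_skip d i acc h h3, pvOuterA_skip d i [] h h3]
      exact pvOuterA_acc d (i + 1) acc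
    · rw [pvOuterA_run d i acc h h3, pvOuterA_run d i [] h h3]
      split
      · rw [pvOuterA_acc d (pvInnerA d i) (acc ++ [(i, pvInnerA d i - 1)]),
            pvOuterA_acc d (pvInnerA d i) ([] ++ [(i, pvInnerA d i - 1)])]
        simp
      · exact pvOuterA_acc d (pvInnerA d i) acc
  · rw [pvOuterA_stop d i acc h, pvOuterA_stop d i [] h]; simp
termination_by d.length - i
decreasing_by all_goals first
  | omega
  | (have := pvInnerA_lt d i h h3; omega)

-- structure: intervals are pairwise ordered and bounded below by the scan index
theorem pvOuterA_struct (d : List Int) (i : Nat) :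
    List.Pairwise (fun p q : Nat × Nat => p.2 < q.1) (pvOuterA d i []) ∧
      ∀ p ∈ pvOuterA d i [], i ≤ p.1 ∧ p.1 ≤ p.2 := by
  by_cases h : i < d.length
  · by_cases h3 : pvAt d i = 3
    · rw [pvOuterA_skip d i [] h h3]
      obtain ⟨hp, hb⟩ := pvOuterA_struct d (i + 1)
      exact ⟨hp, fun p hpm => by have := hb p hpm; omega⟩
    · rw [pvOuterA_run d i [] h h3]
      have hlt := pvInnerA_lt d i h h3
      obtain ⟨hp, hb⟩ := pvOuterA_struct d (pvInnerA d i)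
      split
      · rename_i hlen
        rw [pvOuterA_acc]
        simp only [List.nil_append, List.singleton_append]
        constructor
        · rw [List.pairwise_cons]
          refine ⟨fun q hq => ?_, hp⟩
          have := hb q hq; simp only; omega
        · intro p hpm
          rcases List.mem_cons.mp hpm with rfl | hpm
          · simp; omega
          · have := hb p hpm; omega
      · exact ⟨hp, fun p hpm => by have := hb p hpm; omega⟩
  · rw [pvOuterA_stop d i [] h]; simp
termination_by d.length - i
decreasing_by all_goals first
  | omega
  | (have := pvInnerA_lt d i h h3; omega)

-- forward correspondence: B's forward scan finds exactly the first interval's start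
theorem pvFwd_head (d : List Int) (i : Nat)
    (hinv : i < d.length → pvAt d i ≠ 3 → (i = 0 ∨ pvAt d (i - 1) = 3)) :
    pvFwdB d i = (pvOuterA d i []).head?.map Prod.fst := by
  by_cases h : i < d.length
  · by_cases h3 : pvAt d i = 3
    · rw [pvOuterA_skip d i [] h h3, pvFwdB]
      have hpb : pvPb d i = false := by unfold pvPb; rw [h3]; simp
      simp only [h, dite_true, hpb, Bool.false_eq_true, if_false]
      exact pvFwd_head d (i + 1) (fun _ _ => by right; simpa using h3)
  -- run case
    · rw [pvOuterA_run d i [] h h3]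
      have hlt := pvInnerA_lt d i h h3
      have hle := pvInnerA_le d i (by omega)
      have hstop := pvInnerA_stop d i
      split
      · -- length > 1: appended, head is (i, j-1); pvPb holds at i
        rename_i hlen
        have hrun := pvInnerA_run d i (i + 1) (by omega) (by omega)
        have hpb : pvPb d i = true := by
          simp only [pvPb, Bool.and_eq_true, decide_eq_true_eq, Bool.or_eq_true]
          refine ⟨⟨⟨by simpa using h3, hrun.1⟩, by simpa using hrun.2⟩, ?_⟩
          rcases hinv h (by simpa using h3) with h0 | hprev
          · left; simpa using h0
          · right; simpa using hprev
        rw [pvFwdB]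
        simp only [h, dite_true, hpb, if_true]
        rw [pvOuterA_acc]
        simp
      · -- length 1 run: not appended; pvPb fails at i, both move to j = i + 1
        rename_i hlen
        have hj : pvInnerA d i = i + 1 := by omega
        have hpb : pvPb d i = false := by
          simp only [pvPb, Bool.and_eq_false_iff]
          rcases hstop with hs | hs
          · left; left; right; simp; omega
          · rw [hj] at hs
            by_cases hn : i + 1 < d.length
            · left; right; simp [hs]
            · left; left; right; simp; omega
        rw [pvFwdB]
        simp only [h, dite_true, hpb, Bool.false_eq_true, if_false, hj]
        exact pvFwd_head d (i + 1) (fun hlt2 hne => by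
          rcases pvInnerA_stop d i with hs | hs <;> rw [hj] at hs
          · omega
          · simp at hne; simp [hs] at hne)
  · rw [pvOuterA_stop d i [] h, pvFwdB]
    simp [h]
termination_by d.length - i
decreasing_by all_goals first
  | omega
  | (have := pvInnerA_lt d i h h3; omega)

-- backward correspondence: the last interval's end is the last Q-index in [i, n)
theorem pvLast_end (d : List Int) (i : Nat)
    (hinv : i < d.length → pvAt d i ≠ 3 → (i = 0 ∨ pvAt d (i - 1) = 3)) :
    (pvOuterA d i []).getLast?.map Prod.snd =
      ((List.range' i (d.length - i)).reverse).find? (pvQb d) := by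
  by_cases h : i < d.length
  · by_cases h3 : pvAt d i = 3
    · rw [pvOuterA_skip d i [] h h3]
      have hrange : List.range' i (d.length - i) = i :: List.range' (i + 1) (d.length - (i + 1)) := by
        rw [show d.length - i = (d.length - (i + 1)) + 1 by omega, List.range'_succ]
      have hq : pvQb d i = false := by unfold pvQb; rw [h3]; simp
      rw [hrange, List.reverse_cons, List.find?_append,
        ← pvLast_end d (i + 1) (fun _ _ => by right; simpa using h3)]
      rcases hX : (pvOuterA d (i + 1) []).getLast?.map Prod.snd with _ | v <;> simp [hq]
    · have hlt := pvInnerA_lt d i h h3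
      have hle := pvInnerA_le d i (by omega)
      have hstop := pvInnerA_stop d i
      have hrun := pvInnerA_run d i
      set j := pvInnerA d i with hjdef
      have hinvj : j < d.length → pvAt d j ≠ 3 → (j = 0 ∨ pvAt d (j - 1) = 3) := by
        intro hj hne
        rcases hstop with hs | hs
        · omega
        · exact absurd hs hne
      have hsplit : List.range' i (d.length - i) =
          List.range' i (j - i) ++ List.range' j (d.length - j) := by
        have e := List.range'_append (s := i) (m := j - i) (n := d.length - j) (step := 1)
        rw [show i + 1 * (j - i) = j by omega] at e
        rw [show d.length - i = (j - i) + (d.length - j) by omega, ← e]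
      rw [pvOuterA_run d i [] h h3, hsplit, List.reverse_append, List.find?_append]
      split
      · -- appended case: run length > 1, i.e. j ≥ i + 2
        rename_i hlen
        have hj2 : i + 2 ≤ j := by omega
        have hrunrev : (List.range' i (j - i)).reverse.find? (pvQb d) = some (j - 1) := by
          have e := List.range'_append (s := i) (m := j - i - 1) (n := 1) (step := 1)
          rw [show i + 1 * (j - i - 1) = j - 1 by omega, List.range'_one] at e
          rw [show j - i = (j - i - 1) + 1 by omega, ← e, List.reverse_append]
          simp only [List.reverse_singleton, List.singleton_append, List.find?_cons]
          have hq : pvQb d (j - 1) = true := by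
            have h1 := hrun (j - 1) (by omega) (by omega)
            have h2 := hrun (j - 2) (by omega) (by omega)
            simp only [pvQb, Bool.and_eq_true, decide_eq_true_eq, Bool.or_eq_true]
            refine ⟨⟨⟨by simpa using h1.2, by omega⟩, ?_⟩, ?_⟩
            · rw [show j - 1 - 1 = j - 2 by omega]; simpa using h2.2
            · rcases hstop with hs | hs
              · left; omega
              · right; rw [show j - 1 + 1 = j by omega]; simpa using hs
          simp [hq]
        rw [hrunrev, pvOuterA_acc, ← pvLast_end d j hinvj]
        simp only [List.nil_append, List.singleton_append]
        cases hE2 : pvOuterA d j [] with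
        | nil => simp; omega
        | cons q t =>
          obtain ⟨r, hr2⟩ := Option.isSome_iff_exists.mp
            ((List.getLast?_isSome (l := q :: t)).mpr (by simp))
          rw [List.getLast?_cons_cons, hr2]
          simp
      · -- run of length 1: j = i + 1, nothing appended; pvQb fails at i
        rename_i hlen
        have hj1 : j = i + 1 := by omega
        have hq : pvQb d i = false := by
          rcases hinv h (by simpa using h3) with h0 | hprev
          · subst h0; simp [pvQb]
          · unfold pvQb; rw [hprev]; simp
        have hrunrev : (List.range' i (j - i)).reverse.find? (pvQb d) = none := by
          rw [hj1, show i + 1 - i = 1 by omega, List.range'_one]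
          simp [hq]
        rw [hrunrev, ← pvLast_end d j hinvj]
        rcases hX : (pvOuterA d j []).getLast?.map Prod.snd with _ | v <;> simp
  · rw [pvOuterA_stop d i [] h, show d.length - i = 0 by omega]
    simp
termination_by d.length - i
decreasing_by all_goals first
  | omega
  | (have := pvInnerA_lt d i h h3; omega)

-- pvBwdB scans [0..j] from the top: equals find? over the reversed range
theorem pvBwdB_eq (d : List Int) (j : Nat) :
    pvBwdB d j = ((List.range (j + 1)).reverse).find? (pvQb d) := by
  induction j with
  | zero => simp [pvBwdB, List.range_succ]
  | succ j ih =>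
    rw [pvBwdB, List.range_succ, List.reverse_append]
    simp only [List.reverse_singleton, List.singleton_append, List.find?_cons]
    split <;> rename_i hq
    · simp [hq]
    · simp only [Bool.not_eq_true] at hq; simp [hq, ih]

-- ===== VERDICT (by name: the statement is the Claim_ definition above) =====
theorem find_and_merge_non_three_intervals_spec : Claim_equal_find_and_merge_non_three_intervals := by
  intro data start _
  unfold Spec_find_and_merge_non_three_intervals
  unfold find_and_merge_non_three_intervals find_and_merge_non_three_intervals_alt
  have hinv0 : 0 < data.length → pvAt data 0 ≠ 3 → (0 = 0 ∨ pvAt data (0 - 1) = 3) :=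
    fun _ _ => Or.inl rfl
  have hfwd := pvFwd_head data 0 hinv0
  have hlast := pvLast_end data 0 hinv0
  obtain ⟨hpw, hbd⟩ := pvOuterA_struct data 0
  cases hE : pvOuterA data 0 [] with
  | nil =>
    rw [hE] at hfwd
    simp only [List.head?_nil, Option.map_none] at hfwd
    simp [hfwd]
  | cons p t =>
    rw [hE] at hfwd hlast hpw hbd
    -- the list is nonempty, so data is nonempty
    have hn : 0 < data.length := by
      by_contra hn
      rw [pvOuterA_stop data 0 [] (by omega)] at hE
      simp at hE
    simp only [List.head?_cons, Option.map_some] at hfwd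
    -- min of starts is the head's start
    have hmin : (PySem.List.min? ((p :: t).map (fun q => (q.1 : Int))) (fun x => x)) = some (p.1 : Int) := by
      rcases hM : PySem.List.min? ((p :: t).map (fun q => (q.1 : Int))) (fun x => x) with _ | m
      · rw [PySem.List.min?_eq_none_iff] at hM; simp at hM
      · have hmem := PySem.List.min?_mem hM
        have hminle := PySem.List.min?_isMin hM (p.1 : Int) (by simp)
        simp only [List.mem_map, List.mem_cons] at hmem
        obtain ⟨q, hq, rfl⟩ := hmem
        rcases hq with rfl | hq
        · exact hM
        · exfalso
          have hlt : p.2 < q.1 := (List.pairwise_cons.mp hpw).1 q hq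
          have hple : p.1 ≤ p.2 := (hbd p (by simp)).2
          have hc : (q.1 : Int) ≤ (p.1 : Int) := by simpa using hminle
          have : q.1 ≤ p.1 := by exact_mod_cast hc
          omega
    -- max of ends is the last's end
    obtain ⟨r, hr⟩ : ∃ r, (p :: t).getLast? = some r :=
      Option.isSome_iff_exists.mp ((List.getLast?_isSome (l := p :: t)).mpr (by simp))
    have hmax : (PySem.List.max? ((p :: t).map (fun q => (q.2 : Int))) (fun x => x)) = some (r.2 : Int) := by
      rcases hM : PySem.List.max? ((p :: t).map (fun q => (q.2 : Int))) (fun x => x) with _ | m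
      · rw [PySem.List.max?_eq_none_iff] at hM; simp at hM
      · have hmem := PySem.List.max?_mem hM
        have hrmem : r ∈ p :: t := by
          obtain ⟨l', hl'⟩ := List.getLast?_eq_some_iff.mp hr
          rw [hl']; simp
        have hmaxge := PySem.List.max?_isMax hM (r.2 : Int)
          (by simp only [List.mem_map]; exact ⟨r, hrmem, rfl⟩)
        simp only [List.mem_map] at hmem
        obtain ⟨q, hq, rfl⟩ := hmem
        obtain ⟨l', hl'⟩ := List.getLast?_eq_some_iff.mp hr
        rw [hl'] at hpw hq
        rw [List.pairwise_append] at hpw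
        rcases (List.mem_append.mp hq) with hq' | hq'
        · exfalso
          have hlt : q.2 < r.1 := hpw.2.2 q hq' r (by simp)
          have hrle : r.1 ≤ r.2 := (hbd r (by rw [hl']; simp)).2
          have hc : (r.2 : Int) ≤ (q.2 : Int) := by simpa using hmaxge
          have : r.2 ≤ q.2 := by exact_mod_cast hc
          omega
        · simp at hq'; subst hq'; exact hM
    -- B's backward pass returns the last interval's end
    have hbwd : pvBwdB data (data.length - 1) = some r.2 := by
      rw [pvBwdB_eq, show data.length - 1 + 1 = data.length by omega, List.range_eq_range']
      have : List.find? (pvQb data) (List.range' 0 (data.length - 0)).reverse = some r.2 := by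
        rw [← hlast, hr]; rfl
      simpa using this
    have hne : (p :: t : List (Nat × Nat)) ≠ [] := by simp
    simp only [hfwd, hbwd, if_neg hne, hmin, hmax, Option.getD_some]
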